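-- pv_equiv track=rewrite | github.com/mynlp/optimal-strategy | utils.py | get_unlabeled_spans
-- ===== SOURCE A (Python) =====
-- from typing import Any, TypeAlias
--
-- SpanCount: TypeAlias = dict[tuple[str, int, int], int]
--
-- UnlabeledSpanCount: TypeAlias = dict[tuple[int, int], int]
--
-- def get_unlabeled_spans(span_count: SpanCount) -> UnlabeledSpanCount:
--     unl_span_count: UnlabeledSpanCount = dict()
--
--     for span in span_count:
--         unl_span: tuple[int, int] = span[1:]
--
--         if unl_span not in unl_span_count:
--             unl_span_count[unl_span] = 0
--
--         unl_span_count[unl_span] += span_count[span]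
--
--     return unl_span_count
-- ===== SOURCE B (Python) =====
-- def get_unlabeled_spans(span_count):
--     items = [(span[1:], c) for span, c in span_count.items()]
--     keys = list(dict.fromkeys(k for k, _ in items))
--     return {k: sum(c for k2, c in items if k2 == k) for k in keys}
-- ===== Notes on version B (the rewrite author's own statement) =====
-- stated objective: alternative
-- what changed: Replaces A's single-pass incremental hash accumulation with a two-phase gather: materialize the (stripped_key, count) pairs, deduplicate the stripped keys in first-occurrence order, then build the result by summing each key's counts in a dict comprehension.
import Mathlib
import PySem

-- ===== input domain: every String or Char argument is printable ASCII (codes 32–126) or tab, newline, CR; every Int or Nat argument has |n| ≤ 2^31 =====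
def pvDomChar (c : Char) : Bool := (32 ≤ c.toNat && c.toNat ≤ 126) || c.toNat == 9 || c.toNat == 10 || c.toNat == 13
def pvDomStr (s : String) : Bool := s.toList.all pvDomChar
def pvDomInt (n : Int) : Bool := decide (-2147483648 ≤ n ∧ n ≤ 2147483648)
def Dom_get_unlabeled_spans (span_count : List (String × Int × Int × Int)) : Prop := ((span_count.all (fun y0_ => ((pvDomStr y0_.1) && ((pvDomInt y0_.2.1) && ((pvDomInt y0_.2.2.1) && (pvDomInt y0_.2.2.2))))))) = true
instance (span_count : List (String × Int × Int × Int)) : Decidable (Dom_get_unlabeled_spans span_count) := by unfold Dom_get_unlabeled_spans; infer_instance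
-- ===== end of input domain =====

-- B replaces A's single-pass incremental dict accumulation by a two-phase gather
-- (strip keys, dedup them in first-occurrence order, then sum each key's counts);
-- an alternative decomposition, not claimed faster.

-- Shared input adapter (type convention): the Python dict argument arrives as an
-- association list of flattened 4-tuples; rebuild the PySem.Dict it denotes.
def pvSC (span_count : List (String × Int × Int × Int)) :
    PySem.Dict (String × Int × Int) Int :=
  PySem.Dict.ofList (span_count.map (fun e => ((e.1, e.2.1, e.2.2.1), e.2.2.2)))

-- ===== PORT A =====
def get_unlabeled_spans (span_count : List (String × Int × Int × Int)) : List (Int × Int × Int) :=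
  let sc := pvSC span_count
  -- for span in span_count: (iteration over the dict's keys)
  let unl_span_count : PySem.Dict (Int × Int) Int :=
    sc.keys.foldl (fun d span =>
      let unl_span : Int × Int := (span.2.1, span.2.2)          -- span[1:]
      let d := if d.contains unl_span = false then d.insert unl_span 0 else d
      -- unl_span_count[unl_span] += span_count[span]  (span is a key of sc, so the lookup succeeds)
      d.insert unl_span (d.getD unl_span 0 + sc.getD span 0)) PySem.Dict.empty
  unl_span_count.items.map (fun p => (p.1.1, p.1.2, p.2))

-- ===== PORT B =====
def get_unlabeled_spans_alt (span_count : List (String × Int × Int × Int)) : List (Int × Int × Int) :=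
  -- items = [(span[1:], c) for span, c in span_count.items()]
  let items : List ((Int × Int) × Int) :=
    (pvSC span_count).items.map (fun p => ((p.1.2.1, p.1.2.2), p.2))
  -- keys = list(dict.fromkeys(k for k, _ in items))
  let keys : List (Int × Int) := PySem.List.dedup (items.map Prod.fst)
  -- {k: sum(c for k2, c in items if k2 == k) for k in keys}
  keys.map (fun k => (k.1, k.2, ((items.filter (fun q => q.1 == k)).map Prod.snd).sum))

-- ===== PRECONDITION & SPEC =====
def Spec_get_unlabeled_spans (span_count : List (String × Int × Int × Int)) (out : List (Int × Int × Int)) : Prop := out = get_unlabeled_spans_alt span_count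
instance (span_count : List (String × Int × Int × Int)) (out : List (Int × Int × Int)) : Decidable (Spec_get_unlabeled_spans span_count out) := by unfold Spec_get_unlabeled_spans; infer_instance

-- ===== CLAIM (what is proved, stated in full; the proofs are below) =====
def Claim_equal_get_unlabeled_spans : Prop := ∀ (span_count : List (String × Int × Int × Int)), Dom_get_unlabeled_spans span_count → Spec_get_unlabeled_spans span_count (get_unlabeled_spans span_count)

-- ===== LEMMAS AND PROOFS =====

-- A's two-step body ("set 0 if absent, then +=") is one insert of getD + c.
lemma stepA_eq (d : PySem.Dict (Int × Int) Int) (u : Int × Int) (c : Int) :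
    ((if d.contains u = false then d.insert u 0 else d).insert u
      ((if d.contains u = false then d.insert u 0 else d).getD u 0 + c))
      = d.insert u (d.getD u 0 + c) := by
  by_cases h : d.contains u = false
  · rw [if_pos h, PySem.Dict.getD_insert_self, PySem.Dict.insert_insert_self,
      PySem.Dict.getD_of_not_contains d 0 h]
  · rw [if_neg h]

-- Value of A's accumulation loop at a key: starting value plus the sum of the
-- counts of the entries whose stripped key equals it.
lemma getD_foldA (l : List ((String × Int × Int) × Int)) (d : PySem.Dict (Int × Int) Int)
    (k : Int × Int) :
    (l.foldl (fun d p =>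
        d.insert (p.1.2.1, p.1.2.2) (d.getD (p.1.2.1, p.1.2.2) 0 + p.2)) d).getD k 0
      = d.getD k 0
        + ((l.filter (fun q => ((q.1.2.1, q.1.2.2) : Int × Int) == k)).map Prod.snd).sum := by
  induction l generalizing d with
  | nil => simp
  | cons p t ih =>
    simp only [List.foldl_cons, ih, List.filter_cons]
    by_cases heq : ((p.1.2.1, p.1.2.2) : Int × Int) = k
    · simp [heq]
      ring
    · have hne : k ≠ (p.1.2.1, p.1.2.2) := fun h => heq h.symm
      simp [PySem.Dict.getD_insert, hne, heq]

-- ===== VERDICT (by name: the statement is the Claim_ definition above) =====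
theorem get_unlabeled_spans_spec : Claim_equal_get_unlabeled_spans := by
  intro span_count _
  unfold Spec_get_unlabeled_spans get_unlabeled_spans get_unlabeled_spans_alt
  simp only []
  set sc := pvSC span_count with hsc
  -- iterating over the dict's keys with a lookup = iterating over its items
  have hkeys : sc.keys = sc.items.map Prod.fst := rfl
  rw [hkeys, List.foldl_map]
  have hstep : ∀ (d : PySem.Dict (Int × Int) Int), ∀ q ∈ sc.items,
      ((if d.contains (q.1.2.1, q.1.2.2) = false then d.insert (q.1.2.1, q.1.2.2) 0 else d).insert
        (q.1.2.1, q.1.2.2)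
        ((if d.contains (q.1.2.1, q.1.2.2) = false then d.insert (q.1.2.1, q.1.2.2) 0 else d).getD
          (q.1.2.1, q.1.2.2) 0 + sc.getD q.1 0))
      = d.insert (q.1.2.1, q.1.2.2) (d.getD (q.1.2.1, q.1.2.2) 0 + q.2) := by
    intro d q hq
    have hval : sc.getD q.1 0 = q.2 :=
      PySem.Dict.getD_of_mem_items sc (by simpa using hq)
        (hsc ▸ PySem.Dict.nodup_keys_ofList _) 0
    rw [hval, stepA_eq]
  rw [PySem.List.foldl_congr_mem _ _
    (fun d q => d.insert (q.1.2.1, q.1.2.2) (d.getD (q.1.2.1, q.1.2.2) 0 + q.2)) _ hstep]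
  have hnd : (sc.items.foldl (fun d q =>
      d.insert (q.1.2.1, q.1.2.2) (d.getD (q.1.2.1, q.1.2.2) 0 + q.2)) PySem.Dict.empty).keys.Nodup :=
    PySem.Dict.nodup_keys_foldl_insert_key sc.items
      (fun q => ((q.1.2.1, q.1.2.2) : Int × Int)) _ _ (by simp [PySem.Dict.keys_empty])
  rw [PySem.Dict.items_eq_map_keys _ hnd 0,
    PySem.Dict.keys_foldl_insert_key sc.items (fun q => ((q.1.2.1, q.1.2.2) : Int × Int)) _ _,
    PySem.Dict.keys_empty, PySem.Set.update_nil_left]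
  simp only [getD_foldA, PySem.Dict.getD_empty, zero_add, List.map_map,
    PySem.List.dedup_eq_ofList, List.filter_map, Function.comp_def]
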